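-- pv_equiv track=rewrite | github.com/nikdimentiy/mint | My self-python coding/maximum_occurring_digit.py | maxOccurring
-- ===== SOURCE A (Python) =====
-- def countOccurrences(x, d):
--     count = 0  # Initialize count
--     # of digit d
--     while (x):
--
--         # Increment count if current
--         # digit is same as d
--         if (x % 10 == d):
--             count += 1
--         x = int(x / 10)
--
--     return count
--
-- def maxOccurring(x):
--
--     # Handle negative number
--     if (x < 0):
--         x = -x
--
--     result = 0  # Initialize result
--     # which is a digit
--     max_count = 1  # Initialize count
--     # of result
--
--     # Traverse through all digits
--     for d in range(10):
--
--         # Count occurrences of current digit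
--         count = countOccurrences(x, d)
--
--         # Update max_count and
--         # result if needed
--         if (count >= max_count):
--             max_count = count
--             result = d
--
--     return result
-- ===== SOURCE B (Python) =====
-- def maxOccurring(x):
--     # One tally pass over the digits, then a single 0-9 scan (same >=/seed tie-break as A).
--     x = abs(x)
--     counts = [0] * 10
--     while x:
--         counts[x % 10] += 1
--         x //= 10
--     result, max_count = 0, 1
--     for d in range(10):
--         if counts[d] >= max_count:
--             max_count = counts[d]
--             result = d
--     return result
-- ===== Notes on version B (the rewrite author's own statement) =====
-- stated objective: alternative
-- what changed: Replaces ten independent rescans of the digits (one countOccurrences pass per candidate digit) by a single tally pass building a count table plus one scan over the candidate digits, keeping A's exact tie-break and seed values.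
import Mathlib
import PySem

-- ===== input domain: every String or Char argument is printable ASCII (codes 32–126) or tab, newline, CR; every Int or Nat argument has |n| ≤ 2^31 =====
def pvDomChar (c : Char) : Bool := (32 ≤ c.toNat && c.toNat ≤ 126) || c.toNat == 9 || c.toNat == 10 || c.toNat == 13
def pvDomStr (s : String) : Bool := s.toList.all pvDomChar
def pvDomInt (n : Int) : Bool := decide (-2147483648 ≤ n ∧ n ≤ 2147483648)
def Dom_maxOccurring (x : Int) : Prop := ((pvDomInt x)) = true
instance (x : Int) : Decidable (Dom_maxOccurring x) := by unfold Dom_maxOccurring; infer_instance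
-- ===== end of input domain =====

-- B replaces A's ten per-digit rescans by one tally pass over the digits plus one scan of the
-- candidate digits, keeping A's exact tie-break and seed values; objective: alternative.

-- ===== PORT A =====
-- while (x): … ; x = int(x / 10)   — int(x/10) truncates toward zero = Int.tdiv (exact on Dom, |x| ≤ 2^31 < 2^53)
def coGo (d : Int) (x : Int) (count : Int) : Int :=
  if x = 0 then count
  else coGo d (Int.tdiv x 10) (if PySem.Int.mod x 10 = d then count + 1 else count)
termination_by x.natAbs
decreasing_by
  have : (Int.tdiv x 10).natAbs = x.natAbs / 10 := by
    simp [Int.natAbs_tdiv]; rfl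
  rw [this]
  exact Nat.div_lt_self (Int.natAbs_pos.mpr (by assumption)) (by norm_num)

def countOccurrences (x d : Int) : Int := coGo d x 0

def maxOccurring (x : Int) : Int :=
  let x' := if x < 0 then -x else x
  let st := (PySem.List.pyRange 0 10 1).foldl
    (fun (st : Int × Int) d =>
      let count := countOccurrences x' d
      if count ≥ st.2 then (d, count) else st) (0, 1)
  st.1

-- ===== PORT B =====
-- while x: counts[x % 10] += 1; x //= 10  — only reached with x ≥ 0 (B takes abs first),
-- so the loop test 'x' is 0 < x; the index x % 10 is in 0..9, .toNat is exact there.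
def tallyGo (x : Int) (counts : List Int) : List Int :=
  if x ≤ 0 then counts
  else
    tallyGo (PySem.Int.floordiv x 10)
      (counts.set (PySem.Int.mod x 10).toNat
        (counts.getD (PySem.Int.mod x 10).toNat 0 + 1))
termination_by x.toNat
decreasing_by
  have : PySem.Int.floordiv x 10 = x / 10 := PySem.Int.floordiv_eq_ediv_of_pos (by norm_num)
  rw [this]
  omega

def maxOccurring_alt (x : Int) : Int :=
  let counts := tallyGo |x| (List.replicate 10 0)
  let st := (PySem.List.pyRange 0 10 1).foldl
    (fun (st : Int × Int) d =>
      if counts.getD d.toNat 0 ≥ st.2 then (d, counts.getD d.toNat 0) else st) (0, 1)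
  st.1

-- ===== PRECONDITION & SPEC =====
def Spec_maxOccurring (x : Int) (out : Int) : Prop := out = maxOccurring_alt x
instance (x : Int) (out : Int) : Decidable (Spec_maxOccurring x out) := by unfold Spec_maxOccurring; infer_instance

-- ===== CLAIM (what is proved, stated in full; the proofs are below) =====
def Claim_equal_maxOccurring : Prop := ∀ (x : Int), Dom_maxOccurring x → Spec_maxOccurring x (maxOccurring x)

-- ===== LEMMAS AND PROOFS =====

theorem coGo_zero (d c : Int) : coGo d 0 c = c := by
  rw [coGo]; simp

theorem coGo_step (d x c : Int) (hx : x ≠ 0) :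
    coGo d x c = coGo d (Int.tdiv x 10) (if PySem.Int.mod x 10 = d then c + 1 else c) := by
  conv_lhs => rw [coGo]
  rw [if_neg hx]

theorem tallyGo_stop (x : Int) (counts : List Int) (hx : x ≤ 0) : tallyGo x counts = counts := by
  rw [tallyGo]; simp [hx]

theorem tallyGo_step (x : Int) (counts : List Int) (hx : ¬ x ≤ 0) :
    tallyGo x counts
      = tallyGo (PySem.Int.floordiv x 10)
          (counts.set (PySem.Int.mod x 10).toNat (counts.getD (PySem.Int.mod x 10).toNat 0 + 1)) := by
  conv_lhs => rw [tallyGo]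
  rw [if_neg hx]

-- coGo accumulates: the running count factors out of the loop.
theorem coGo_acc (d : Int) (x : Int) (c : Int) : coGo d x c = c + coGo d x 0 := by
  induction hn : x.natAbs using Nat.strong_induction_on generalizing x c with
  | _ n ih =>
    by_cases hx : x = 0
    · simp [hx, coGo_zero]
    · have hlt : (Int.tdiv x 10).natAbs < n := by
        have h1 : (Int.tdiv x 10).natAbs = x.natAbs / 10 := by
          simp [Int.natAbs_tdiv]; rfl
        rw [h1, ← hn]
        exact Nat.div_lt_self (Int.natAbs_pos.mpr hx) (by norm_num)
      rw [coGo_step d x c hx, coGo_step d x 0 hx]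
      rw [ih _ hlt _ _ rfl,
          ih _ hlt (Int.tdiv x 10) (if PySem.Int.mod x 10 = d then (0:Int) + 1 else 0) rfl]
      split_ifs <;> ring

-- The tally table holds, at each slot i < 10, the old entry plus A's per-digit count.
theorem tally_spec (x : Int) (hx : 0 ≤ x) (counts : List Int) (hlen : counts.length = 10)
    (i : Nat) (hi : i < 10) :
    (tallyGo x counts).getD i 0 = counts.getD i 0 + coGo (i : Int) x 0 := by
  induction hn : x.toNat using Nat.strong_induction_on generalizing x counts with
  | _ n ih =>
    by_cases h0 : x ≤ 0
    · rw [tallyGo_stop x counts h0, le_antisymm h0 hx, coGo_zero]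
      ring
    · have hxpos : 0 < x := by omega
      have hm0 : 0 ≤ PySem.Int.mod x 10 := PySem.Int.mod_nonneg x (by norm_num)
      have hm10 : PySem.Int.mod x 10 < 10 := PySem.Int.mod_lt x (by norm_num)
      set m : Nat := (PySem.Int.mod x 10).toNat with hm
      have hmlt : m < 10 := by omega
      set counts' := counts.set m (counts.getD m 0 + 1) with hc'
      have hlen' : counts'.length = 10 := by simp [hc', hlen]
      have hfd : PySem.Int.floordiv x 10 = x / 10 := PySem.Int.floordiv_eq_ediv_of_pos (by norm_num)
      have hfd0 : 0 ≤ x / 10 := by positivity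
      have hlt : (x / 10).toNat < n := by omega
      rw [tallyGo_step x counts h0, hfd]
      rw [ih _ hlt _ hfd0 counts' hlen' rfl]
      -- unfold one step of coGo on the A side
      have htd : Int.tdiv x 10 = x / 10 := Int.tdiv_eq_ediv_of_nonneg hx
      rw [coGo_step (i : Int) x 0 (by omega), htd, coGo_acc]
      have hset : counts'.getD i 0 = counts.getD i 0 + (if m = i then 1 else 0) := by
        by_cases hmi : m = i
        · subst hmi
          simp [hc', List.getD_eq_getElem?_getD, List.getElem?_set_self (by omega : m < counts.length)]
        · simp [hc', List.getD_eq_getElem?_getD, List.getElem?_set_ne hmi, hmi]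
      rw [hset]
      have hiff : (PySem.Int.mod x 10 = (i : Int)) ↔ (m = i) := by omega
      by_cases hmi : m = i
      · rw [if_pos hmi, if_pos (hiff.mpr hmi), coGo_acc ((i : Int)) (x / 10) (0 + 1)]; ring
      · rw [if_neg hmi, if_neg (fun h => hmi (hiff.mp h))]; ring

-- Both folds agree once the per-digit values agree on every element of the list.
theorem fold_congr (l : List Int) (f g : Int → Int) (h : ∀ d ∈ l, f d = g d) (st : Int × Int) :
    l.foldl (fun st d => if f d ≥ st.2 then (d, f d) else st) st
      = l.foldl (fun st d => if g d ≥ st.2 then (d, g d) else st) st := by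
  induction l generalizing st with
  | nil => rfl
  | cons a l ih =>
    simp only [List.foldl_cons]
    rw [h a (by simp)]
    exact ih (fun d hd => h d (by simp [hd])) _

theorem replicate_getD_zero (i : Nat) : (List.replicate 10 (0:Int)).getD i 0 = 0 := by
  rw [List.getD_eq_getElem?_getD, List.getElem?_replicate]
  split <;> rfl

-- ===== VERDICT (by name: the statement is the Claim_ definition above) =====
theorem maxOccurring_spec : Claim_equal_maxOccurring := by
  intro x _
  unfold Spec_maxOccurring maxOccurring maxOccurring_alt
  have habs : |x| = if x < 0 then -x else x := by
    split_ifs with h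
    · exact abs_of_neg h
    · exact abs_of_nonneg (by omega)
  set y := if x < 0 then -x else x with hy
  have hy0 : 0 ≤ y := by rw [hy]; split_ifs <;> omega
  rw [habs]
  simp only []
  apply congrArg Prod.fst
  apply fold_congr
  intro d hd
  have hd' : 0 ≤ d ∧ d < 10 := by
    have := PySem.List.mem_pyRange_one.mp hd
    omega
  have hts : ((tallyGo y (List.replicate 10 0)).getD d.toNat 0)
      = (List.replicate 10 (0:Int)).getD d.toNat 0 + coGo (d.toNat : Int) y 0 :=
    tally_spec y hy0 _ (by simp) d.toNat (by omega)
  have hdc : (d.toNat : Int) = d := by omega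
  rw [countOccurrences, hts, hdc, replicate_getD_zero]
  ring
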